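-- pv_equiv track=rewrite | github.com/Toiste/tdd-roman | dever.py | int_to_roman
-- ===== SOURCE A (Python) =====
-- def int_to_roman(num):
--     roman_numerals = [
--         (1000, 'M'), (900, 'CM'), (500, 'D'), (400, 'CD'),
--         (100, 'C'), (90, 'XC'), (50, 'L'), (40, 'XL'),
--         (10, 'X'), (9, 'IX'), (5, 'V'), (4, 'IV'), (1, 'I')
--     ]
--
--     result = ""
--     for value, numeral in roman_numerals:
--         while num >= value:
--             result += numeral
--             num -= value
--     return result
-- ===== SOURCE B (Python) =====
-- def int_to_roman(num):
--     if num < 1: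
--         return ''
--     ones = ['', 'I', 'II', 'III', 'IV', 'V', 'VI', 'VII', 'VIII', 'IX']
--     tens = ['', 'X', 'XX', 'XXX', 'XL', 'L', 'LX', 'LXX', 'LXXX', 'XC']
--     hundreds = ['', 'C', 'CC', 'CCC', 'CD', 'D', 'DC', 'DCC', 'DCCC', 'CM']
--     return ('M' * (num // 1000)
--             + hundreds[num // 100 % 10]
--             + tens[num // 10 % 10]
--             + ones[num % 10])
-- ===== Notes on version B (the rewrite author's own statement) =====
-- stated objective: idiomatic
-- what changed: Replaces the greedy repeated-subtraction loop over a value/numeral table by direct per-decimal-digit lookup tables (ones/tens/hundreds) plus 'M'*(num//1000), with no loop at all.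
import Mathlib
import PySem

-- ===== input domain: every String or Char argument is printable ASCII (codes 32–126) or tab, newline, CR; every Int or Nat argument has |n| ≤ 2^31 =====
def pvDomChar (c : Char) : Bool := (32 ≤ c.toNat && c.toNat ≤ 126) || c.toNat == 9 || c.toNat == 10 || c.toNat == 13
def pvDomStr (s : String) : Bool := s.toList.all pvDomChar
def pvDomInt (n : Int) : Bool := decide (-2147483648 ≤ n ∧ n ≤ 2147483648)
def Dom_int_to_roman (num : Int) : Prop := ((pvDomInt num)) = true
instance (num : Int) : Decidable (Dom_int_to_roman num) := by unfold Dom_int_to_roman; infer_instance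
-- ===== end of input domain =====

-- B replaces A's greedy repeated-subtraction loop by per-decimal-digit table lookups; same return value for every int.

-- ===== PORT A =====
-- the table A builds inside the function (hoisted to a constant, unchanged)
def pvRomanTable : List (Int × String) :=
  [(1000, "M"), (900, "CM"), (500, "D"), (400, "CD"),
   (100, "C"), (90, "XC"), (50, "L"), (40, "XL"),
   (10, "X"), (9, "IX"), (5, "V"), (4, "IV"), (1, "I")]

-- 'while num >= value: result += numeral; num -= value', with fuel num.toNat + 1
-- (always enough: each iteration lowers num by value ≥ 1); returns (result, num)
def pvWhile : Nat → Int → String → Int → String → String × Int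
  | 0, _, _, num, res => (res, num)
  | fuel + 1, v, s, num, res =>
      if v ≤ num then pvWhile fuel v s (num - v) (res ++ s) else (res, num)

def int_to_roman (num : Int) : String :=
  (pvRomanTable.foldl (fun st vn => pvWhile (st.2.toNat + 1) vn.1 vn.2 st.2 st.1) ("", num)).1

-- ===== PORT B =====
def pvOnes : List String := ["", "I", "II", "III", "IV", "V", "VI", "VII", "VIII", "IX"]
def pvTens : List String := ["", "X", "XX", "XXX", "XL", "L", "LX", "LXX", "LXXX", "XC"]
def pvHundreds : List String := ["", "C", "CC", "CCC", "CD", "D", "DC", "DCC", "DCCC", "CM"]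

-- 'M' * k (Python string repetition; k is nonnegative here since num ≥ 1)
def pvStrRep (s : String) : Nat → String
  | 0 => ""
  | n + 1 => s ++ pvStrRep s n

-- list[i] with an index that is always in range (0..9), so pyGetD's default is never used: exact
def int_to_roman_alt (num : Int) : String :=
  if num < 1 then "" else
    pvStrRep "M" (PySem.Int.floordiv num 1000).toNat ++
      (PySem.List.pyGetD pvHundreds (PySem.Int.mod (PySem.Int.floordiv num 100) 10) "" ++
        (PySem.List.pyGetD pvTens (PySem.Int.mod (PySem.Int.floordiv num 10) 10) "" ++
          PySem.List.pyGetD pvOnes (PySem.Int.mod num 10) ""))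

-- ===== PRECONDITION & SPEC =====
def Spec_int_to_roman (num : Int) (out : String) : Prop := out = int_to_roman_alt num
instance (num : Int) (out : String) : Decidable (Spec_int_to_roman num out) := by unfold Spec_int_to_roman; infer_instance

-- ===== CLAIM (what is proved, stated in full; the proofs are below) =====
def Claim_equal_int_to_roman : Prop := ∀ (num : Int), Dom_int_to_roman num → Spec_int_to_roman num (int_to_roman num)

-- ===== LEMMAS AND PROOFS =====

-- closed form for A's inner while loop: 0 < v and enough fuel
theorem pvWhile_eq (v : Int) (s : String) (hv : 0 < v) :
    ∀ (fuel : Nat) (num : Int) (res : String), 0 ≤ num → num.toNat < fuel →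
      pvWhile fuel v s num res = (res ++ pvStrRep s ((num / v).toNat), num % v) := by
  intro fuel
  induction fuel with
  | zero => intro num res _ h; omega
  | succ n ih =>
    intro num res h0 hf
    simp only [pvWhile]
    by_cases h : v ≤ num
    · rw [if_pos h, ih (num - v) (res ++ s) (by omega) (by omega)]
      have hnum : num - v = num + (-1) * v := by ring
      have hq : (num - v) / v = num / v + (-1) := by
        rw [hnum]; exact Int.add_mul_ediv_right num (-1) (ne_of_gt hv)
      have hm : (num - v) % v = num % v := by
        rw [hnum]; exact Int.add_mul_emod_self_right ..
      have h1 : 1 ≤ num / v := by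
        have := Int.ediv_le_ediv hv h
        rwa [Int.ediv_self (ne_of_gt hv)] at this
      have ht : (num / v).toNat = ((num - v) / v).toNat + 1 := by omega
      rw [hm, ht]
      simp only [pvStrRep, String.append_assoc]
    · rw [if_neg h]
      have hlt : num < v := not_le.mp h
      rw [Int.ediv_eq_zero_of_lt h0 hlt, Int.emod_eq_of_lt h0 hlt]
      simp [pvStrRep]

-- the result string threads through the loop as a pure prefix
theorem pvWhile_factor (v : Int) (s : String) :
    ∀ (fuel : Nat) (num : Int) (res : String),
      pvWhile fuel v s num res =
        (res ++ (pvWhile fuel v s num "").1, (pvWhile fuel v s num "").2) := by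
  intro fuel
  induction fuel with
  | zero => intro num res; simp [pvWhile]
  | succ n ih =>
    intro num res
    by_cases h : v ≤ num
    · simp only [pvWhile, if_pos h]
      rw [ih (num - v) (res ++ s), ih (num - v) ("" ++ s)]
      simp [String.append_assoc]
    · simp [pvWhile, if_neg h]

-- and likewise through the whole fold
theorem foldA_factor :
    ∀ (ts : List (Int × String)) (res : String) (r : Int),
      ts.foldl (fun st vn => pvWhile (st.2.toNat + 1) vn.1 vn.2 st.2 st.1) (res, r) =
        (res ++ (ts.foldl (fun st vn => pvWhile (st.2.toNat + 1) vn.1 vn.2 st.2 st.1) ("", r)).1,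
          (ts.foldl (fun st vn => pvWhile (st.2.toNat + 1) vn.1 vn.2 st.2 st.1) ("", r)).2) := by
  intro ts
  induction ts with
  | nil => intro res r; simp
  | cons t ts ih =>
    intro res r
    show (ts.foldl _ (pvWhile (r.toNat + 1) t.1 t.2 r res)) =
      (res ++ (ts.foldl _ (pvWhile (r.toNat + 1) t.1 t.2 r "")).1,
        (ts.foldl _ (pvWhile (r.toNat + 1) t.1 t.2 r "")).2)
    rw [pvWhile_factor t.1 t.2 (r.toNat + 1) r res,
        pvWhile_factor t.1 t.2 (r.toNat + 1) r ""]
    rw [ih, ih ("" ++ (pvWhile (r.toNat + 1) t.1 t.2 r "").1)]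
    simp [String.append_assoc]

def pvRestTable : List (Int × String) :=
  [(900, "CM"), (500, "D"), (400, "CD"),
   (100, "C"), (90, "XC"), (50, "L"), (40, "XL"),
   (10, "X"), (9, "IX"), (5, "V"), (4, "IV"), (1, "I")]

def pvG (r : Int) : String :=
  (pvRestTable.foldl (fun st vn => pvWhile (st.2.toNat + 1) vn.1 vn.2 st.2 st.1) ("", r)).1

def pvT (r : Int) : String :=
  PySem.List.pyGetD pvHundreds (r / 100 % 10) "" ++
    (PySem.List.pyGetD pvTens (r / 10 % 10) "" ++ PySem.List.pyGetD pvOnes (r % 10) "")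

set_option maxRecDepth 40000 in
theorem pvGT : ∀ n : Nat, n < 1000 → pvG (n : Int) = pvT (n : Int) := by decide

-- when num < 1 and every table value is ≥ 1, no loop body ever runs
theorem fold_notrun (num : Int) (hn : num < 1) :
    ∀ (ts : List (Int × String)), (∀ p ∈ ts, 1 ≤ p.1) → ∀ res : String,
      ts.foldl (fun st vn => pvWhile (st.2.toNat + 1) vn.1 vn.2 st.2 st.1) (res, num) = (res, num) := by
  intro ts
  induction ts with
  | nil => intro _ res; rfl
  | cons t ts ih =>
    intro hv res
    show ts.foldl _ (pvWhile (num.toNat + 1) t.1 t.2 num res) = (res, num)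
    rw [show pvWhile (num.toNat + 1) t.1 t.2 num res = (res, num) by
      simp only [pvWhile]
      rw [if_neg (by have := hv t (List.mem_cons_self ..); omega)]]
    exact ih (fun p hp => hv p (List.mem_cons_of_mem _ hp)) res

theorem A_eq_B (num : Int) : int_to_roman num = int_to_roman_alt num := by
  by_cases hneg : num < 1
  · unfold int_to_roman int_to_roman_alt
    rw [fold_notrun num hneg pvRomanTable (by decide) "", if_pos hneg]
  · have h1 : (1 : Int) ≤ num := by omega
    unfold int_to_roman
    have hsplit : pvRomanTable.foldl
        (fun st vn => pvWhile (st.2.toNat + 1) vn.1 vn.2 st.2 st.1) ("", num) =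
        pvRestTable.foldl (fun st vn => pvWhile (st.2.toNat + 1) vn.1 vn.2 st.2 st.1)
          (pvWhile (num.toNat + 1) 1000 "M" num "") := by
      rw [show pvRomanTable = (1000, "M") :: pvRestTable from rfl, List.foldl_cons]
    rw [hsplit,
        pvWhile_eq 1000 "M" (by omega) (num.toNat + 1) num "" (by omega) (by omega),
        foldA_factor]
    show ("" ++ pvStrRep "M" ((num / 1000).toNat)) ++ pvG (num % 1000) = int_to_roman_alt num
    unfold int_to_roman_alt
    rw [if_neg (by omega)]
    rw [PySem.Int.floordiv_eq_ediv_of_pos (by omega : (0:Int) < 1000),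
        PySem.Int.floordiv_eq_ediv_of_pos (by omega : (0:Int) < 100),
        PySem.Int.floordiv_eq_ediv_of_pos (by omega : (0:Int) < 10),
        PySem.Int.mod_eq_emod_of_pos (by omega : (0:Int) < 10),
        PySem.Int.mod_eq_emod_of_pos (by omega : (0:Int) < 10),
        PySem.Int.mod_eq_emod_of_pos (by omega : (0:Int) < 10)]
    have e1 : num / 100 % 10 = (num % 1000) / 100 % 10 := by omega
    have e2 : num / 10 % 10 = (num % 1000) / 10 % 10 := by omega
    have e3 : num % 10 = (num % 1000) % 10 := by omega
    rw [e1, e2, e3, String.empty_append]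
    have hr : num % 1000 = (((num % 1000).toNat : Nat) : Int) := by omega
    rw [hr, pvGT (num % 1000).toNat (by omega)]
    rfl

-- ===== VERDICT (by name: the statement is the Claim_ definition above) =====
theorem int_to_roman_spec : Claim_equal_int_to_roman := by
  intro num _
  exact A_eq_B num
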